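-- pv_equiv track=rewrite | github.com/tmammadov17503/Python_Projects | Python/DSA/Week_1/(G)_concat_of_two_polidromes.py | func
-- ===== SOURCE A (Python) =====
-- def func(n, k):
--     mod = 10 ** 9 + 7
--     total = 0
--     for i in range(1, n):
--         left_len = (i + 1) // 2
--         right_len = ((n - i) + 1) // 2
--         total += (pow(k, left_len, mod)) * ((pow(k, right_len, mod)) % mod)
--         total %= mod
--     return total
-- ===== SOURCE B (Python) =====
-- def func(n, k):
--     # Closed form: the exponent left_len+right_len depends only on i's parity,
--     # so the sum is n//2 copies of k^((n+2)//2) plus (n-1)//2 copies of k^((n+1)//2);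
--     # one hand-rolled square-and-multiply yields the lower power, one extra multiply the other.
--     mod = 10 ** 9 + 7
--     if n < 2:
--         return 0
--
--     def mpow(b, e):
--         r = 1
--         b %= mod
--         while e > 0:
--             if e & 1:
--                 r = r * b % mod
--             b = b * b % mod
--             e >>= 1
--         return r
--
--     p1 = mpow(k, (n + 1) // 2)
--     p2 = p1 * (k % mod) % mod if n % 2 == 0 else p1
--     return ((n // 2) * p2 + ((n - 1) // 2) * p1) % mod
-- ===== Notes on version B (the rewrite author's own statement) =====
-- stated objective: faster
-- what changed: Replaced the O(n) loop over all split points (two modular exponentiations per split) by a parity-grouped closed form evaluated with a single hand-rolled square-and-multiply modular power: n//2 odd splits contribute k^((n+2)//2), (n-1)//2 even splits k^((n+1)//2), and the second power is the first times k when n is even.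
import Mathlib
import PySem

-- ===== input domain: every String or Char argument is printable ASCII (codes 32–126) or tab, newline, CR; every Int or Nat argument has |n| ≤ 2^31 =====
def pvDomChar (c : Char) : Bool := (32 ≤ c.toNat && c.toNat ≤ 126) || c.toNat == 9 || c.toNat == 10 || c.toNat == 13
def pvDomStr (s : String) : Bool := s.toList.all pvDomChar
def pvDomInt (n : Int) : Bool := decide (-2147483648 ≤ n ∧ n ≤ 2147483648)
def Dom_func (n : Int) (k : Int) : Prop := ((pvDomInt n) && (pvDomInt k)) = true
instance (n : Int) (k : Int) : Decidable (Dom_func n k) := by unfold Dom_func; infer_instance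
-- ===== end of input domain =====

-- B replaces A's loop over all n-1 split points by a parity-grouped closed form evaluated with a
-- hand-rolled square-and-multiply modular power; equality of the RETURN values is proved (A is total).

-- ===== PORT A =====
-- Literal port of A's loop; pow(k, e, mod) is PySem.Int.powMod with a Nat exponent —
-- exact here since e = (i+1)//2 resp. (n-i+1)//2 is ≥ 1 for every i in range(1, n).
def func (n : Int) (k : Int) : Int :=
  (PySem.List.pyRange 1 n 1).foldl
    (fun total i =>
      PySem.Int.mod
        (total +
          PySem.Int.powMod k (PySem.Int.floordiv (i + 1) 2).toNat (10 ^ 9 + 7) *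
            PySem.Int.mod
              (PySem.Int.powMod k (PySem.Int.floordiv (n - i + 1) 2).toNat (10 ^ 9 + 7))
              (10 ^ 9 + 7))
        (10 ^ 9 + 7))
    0

-- ===== PORT B =====
-- Source B's modulus constant and its hand-written square-and-multiply loop (while e > 0: …),
-- transcribed as the evident recursion on the exponent (e >>= 1 becomes e / 2).
def pvP : Int := 10 ^ 9 + 7

def pvMpowAux (r : Int) (b : Int) (e : Nat) : Int :=
  if e = 0 then r
  else pvMpowAux (if e % 2 = 1 then PySem.Int.mod (r * b) pvP else r)
    (PySem.Int.mod (b * b) pvP) (e / 2)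
termination_by e
decreasing_by exact Nat.div_lt_self (Nat.pos_of_ne_zero ‹_›) (by norm_num)

-- Source B: n//2 odd splits contribute k^((n+2)//2), (n-1)//2 even splits k^((n+1)//2);
-- p1 is the lower power, p2 the other (p1·k when n is even, else p1 itself).
def func_alt (n : Int) (k : Int) : Int :=
  if n < 2 then 0
  else
    let p1 := pvMpowAux 1 (PySem.Int.mod k pvP) (PySem.Int.floordiv (n + 1) 2).toNat
    let p2 := if PySem.Int.mod n 2 = 0 then PySem.Int.mod (p1 * PySem.Int.mod k pvP) pvP else p1
    PySem.Int.mod (PySem.Int.floordiv n 2 * p2 + PySem.Int.floordiv (n - 1) 2 * p1) pvP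

-- ===== PRECONDITION & SPEC =====
def Spec_func (n : Int) (k : Int) (out : Int) : Prop := out = func_alt n k
instance (n : Int) (k : Int) (out : Int) : Decidable (Spec_func n k out) := by unfold Spec_func; infer_instance

-- ===== CLAIM (what is proved, stated in full; the proofs are below) =====
def Claim_equal_func : Prop := ∀ (n : Int) (k : Int), Dom_func n k → Spec_func n k (func n k)

-- ===== LEMMAS AND PROOFS =====

theorem pvP_pos : (0 : Int) < pvP := by unfold pvP; norm_num

-- Invariant of Source B's square-and-multiply loop: with reduced state it returns r·b^e mod p.
theorem pv_mpowAux_eq : ∀ (e : Nat) (r b : Int), 0 ≤ r → r < pvP → 0 ≤ b → b < pvP →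
    pvMpowAux r b e = r * b ^ e % pvP := by
  intro e
  induction e using Nat.strong_induction_on with
  | _ e ih =>
    intro r b hr0 hrp hb0 hbp
    unfold pvMpowAux
    by_cases he : e = 0
    · subst he; simp [Int.emod_eq_of_lt hr0 hrp]
    · rw [if_neg he]
      simp only [PySem.Int.mod_eq_emod_of_pos pvP_pos]
      have hlt : e / 2 < e := Nat.div_lt_self (Nat.pos_of_ne_zero he) (by norm_num)
      rw [ih (e / 2) hlt _ _
        (by split_ifs
            · exact Int.emod_nonneg _ (by have := pvP_pos; omega)
            · exact hr0)
        (by split_ifs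
            · exact Int.emod_lt_of_pos _ pvP_pos
            · exact hrp)
        (Int.emod_nonneg _ (by have := pvP_pos; omega))
        (Int.emod_lt_of_pos _ pvP_pos)]
      have hsq : (b * b % pvP) ^ (e / 2) ≡ b ^ (2 * (e / 2)) [ZMOD pvP] := by
        calc (b * b % pvP) ^ (e / 2) ≡ (b * b) ^ (e / 2) [ZMOD pvP] :=
              Int.ModEq.pow _ (Int.emod_emod_of_dvd _ dvd_rfl)
          _ = b ^ (2 * (e / 2)) := by rw [pow_mul]; ring_nf
      have hr' : (if e % 2 = 1 then r * b % pvP else r) ≡ r * b ^ (e % 2) [ZMOD pvP] := by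
        by_cases hp : e % 2 = 1
        · rw [if_pos hp, hp, pow_one]; exact Int.emod_emod_of_dvd _ dvd_rfl
        · have : e % 2 = 0 := by omega
          rw [if_neg hp, this, pow_zero, mul_one]
      have : (if e % 2 = 1 then r * b % pvP else r) * (b * b % pvP) ^ (e / 2)
          ≡ r * b ^ e [ZMOD pvP] := by
        calc (if e % 2 = 1 then r * b % pvP else r) * (b * b % pvP) ^ (e / 2)
            ≡ r * b ^ (e % 2) * b ^ (2 * (e / 2)) [ZMOD pvP] := Int.ModEq.mul hr' hsq
          _ = r * b ^ (e % 2 + 2 * (e / 2)) := by rw [pow_add]; ring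
          _ = r * b ^ e := by rw [Nat.mod_add_div]
      exact this

-- Source B's mpow(k, e) equals Python's pow(k, e, p).
theorem pv_mpow_eq (k : Int) (e : Nat) :
    pvMpowAux 1 (PySem.Int.mod k pvP) e = k ^ e % pvP := by
  rw [PySem.Int.mod_eq_emod_of_pos pvP_pos,
    pv_mpowAux_eq e 1 (k % pvP) (by norm_num) (by have := pvP_pos; unfold pvP at *; omega)
      (Int.emod_nonneg _ (by have := pvP_pos; omega)) (Int.emod_lt_of_pos _ pvP_pos),
    one_mul]
  exact (Int.ModEq.pow e (Int.emod_emod_of_dvd _ dvd_rfl) : (k % pvP) ^ e ≡ k ^ e [ZMOD pvP])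

-- A's loop accumulates (total + h i) % p; with start 0 that is (Σ h) % p.
theorem pv_foldl_mod_sum (p : Int) (h : Int → Int) (l : List Int) :
    ∀ (t : Int),
      l.foldl (fun total i => (total + h i) % p) (t % p) = (t + (l.map h).sum) % p := by
  induction l with
  | nil => intro t; simp
  | cons x xs ih =>
    intro t
    simp only [List.foldl_cons, List.map_cons, List.sum_cons]
    rw [Int.emod_add_emod, ih (t + h x)]
    congr 1
    ring

theorem pv_foldl_mod_sum' (p : Int) (h : Int → Int) (l : List Int) :
    l.foldl (fun total i => (total + h i) % p) 0 = (l.map h).sum % p := by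
  have := pv_foldl_mod_sum p h l 0
  simpa using this

theorem pv_sum_map_modeq (p : Int) (h g : Int → Int) :
    ∀ (l : List Int), (∀ i ∈ l, h i ≡ g i [ZMOD p]) →
      (l.map h).sum ≡ (l.map g).sum [ZMOD p] := by
  intro l
  induction l with
  | nil => intro _; simp
  | cons x xs ih =>
    intro hm
    simp only [List.map_cons, List.sum_cons]
    exact Int.ModEq.add (hm x (by simp)) (ih (fun i hi => hm i (by simp [hi])))

-- The per-split term is congruent mod p to a single power whose exponent depends only on i's parity.
theorem pv_term_modeq (p n k i : Int) (h1 : 1 ≤ i) (h2 : i < n) :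
    (k ^ ((i + 1) / 2).toNat % p) * (k ^ ((n - i + 1) / 2).toNat % p % p)
      ≡ k ^ (if i % 2 = 1 then ((n + 2) / 2).toNat else ((n + 1) / 2).toNat) [ZMOD p] := by
  rw [Int.emod_emod_of_dvd _ dvd_rfl]
  have hab : ((i + 1) / 2).toNat + ((n - i + 1) / 2).toNat
      = (if i % 2 = 1 then ((n + 2) / 2).toNat else ((n + 1) / 2).toNat) := by
    by_cases hi : i % 2 = 1 <;> simp only [hi, if_true, if_false] <;> omega
  calc (k ^ ((i + 1) / 2).toNat % p) * (k ^ ((n - i + 1) / 2).toNat % p)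
      ≡ k ^ ((i + 1) / 2).toNat * k ^ ((n - i + 1) / 2).toNat [ZMOD p] :=
        Int.ModEq.mul (Int.emod_emod_of_dvd _ dvd_rfl) (Int.emod_emod_of_dvd _ dvd_rfl)
    _ = k ^ (((i + 1) / 2).toNat + ((n - i + 1) / 2).toNat) := (pow_add k _ _).symm
    _ = _ := by rw [hab]

-- Closed form of a parity-alternating sum over range(1, N).
theorem pv_sum_parity (a b : Int) :
    ∀ (N : Nat), 1 ≤ N →
      ((PySem.List.pyRange 1 (N : Int) 1).map (fun i => if i % 2 = 1 then a else b)).sum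
        = (N : Int) / 2 * a + ((N : Int) - 1) / 2 * b := by
  intro N
  induction N with
  | zero => intro h; omega
  | succ N ih =>
    intro _
    by_cases hN : 1 ≤ N
    · have h1 : (1 : Int) ≤ (N : Int) := by exact_mod_cast hN
      have hcast : ((N + 1 : Nat) : Int) = (N : Int) + 1 := by push_cast; ring
      rw [hcast, PySem.List.pyRange_one_succ_right (by omega), List.map_append,
        List.sum_append, ih hN]
      simp only [List.map_cons, List.map_nil, List.sum_cons, List.sum_nil, add_zero]
      by_cases hp : (N : Int) % 2 = 1
      · rw [if_pos hp]
        have c1 : ((N : Int) + 1) / 2 = (N : Int) / 2 + 1 := by omega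
        have c2 : ((N : Int) + 1 - 1) / 2 = ((N : Int) - 1) / 2 := by omega
        have c3 : (N : Int) / 2 = ((N : Int) - 1) / 2 := by omega
        rw [c1, c2, c3]; ring
      · rw [if_neg hp]
        have c1 : ((N : Int) + 1) / 2 = (N : Int) / 2 := by omega
        have c2 : ((N : Int) + 1 - 1) / 2 = ((N : Int) - 1) / 2 + 1 := by omega
        rw [c1, c2]; ring
    · have hN0 : N = 0 := by omega
      subst hN0
      rw [PySem.List.pyRange_one_eq_nil (by norm_num)]
      norm_num

theorem pv_mpow_eq' (k : Int) (e : Nat) :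
    pvMpowAux 1 (k % pvP) e = k ^ e % pvP := by
  rw [← PySem.Int.mod_eq_emod_of_pos pvP_pos]; exact pv_mpow_eq k e

-- B's two powers p2, p1 are congruent mod p to k^((n+2)//2) resp. k^((n+1)//2).
theorem pv_alt_value (n k : Int) (hn : ¬ n < 2) :
    func_alt n k = (n / 2 * k ^ ((n + 2) / 2).toNat + (n - 1) / 2 * k ^ ((n + 1) / 2).toNat)
      % (10 ^ 9 + 7) := by
  have h2 : (0 : Int) < 2 := by norm_num
  simp only [func_alt, if_neg hn, pv_mpow_eq', PySem.Int.mod_eq_emod_of_pos pvP_pos,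
    PySem.Int.mod_eq_emod_of_pos h2, PySem.Int.floordiv_eq_ediv_of_pos h2]
  show (n / 2 * (if n % 2 = 0 then k ^ ((n + 1) / 2).toNat % pvP * (k % pvP) % pvP
        else k ^ ((n + 1) / 2).toNat % pvP) +
      (n - 1) / 2 * (k ^ ((n + 1) / 2).toNat % pvP)) % pvP = _
  have hp1 : k ^ ((n + 1) / 2).toNat % pvP ≡ k ^ ((n + 1) / 2).toNat [ZMOD pvP] :=
    Int.emod_emod_of_dvd _ dvd_rfl
  have hp2 : (if n % 2 = 0 then k ^ ((n + 1) / 2).toNat % pvP * (k % pvP) % pvP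
        else k ^ ((n + 1) / 2).toNat % pvP) ≡ k ^ ((n + 2) / 2).toNat [ZMOD pvP] := by
    by_cases hpar : n % 2 = 0
    · rw [if_pos hpar]
      have he : ((n + 2) / 2).toNat = ((n + 1) / 2).toNat + 1 := by omega
      rw [he, pow_succ]
      calc k ^ ((n + 1) / 2).toNat % pvP * (k % pvP) % pvP
          ≡ k ^ ((n + 1) / 2).toNat % pvP * (k % pvP) [ZMOD pvP] :=
            Int.emod_emod_of_dvd _ dvd_rfl
        _ ≡ k ^ ((n + 1) / 2).toNat * k [ZMOD pvP] :=
            Int.ModEq.mul (Int.emod_emod_of_dvd _ dvd_rfl) (Int.emod_emod_of_dvd _ dvd_rfl)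
    · rw [if_neg hpar]
      have he : ((n + 2) / 2).toNat = ((n + 1) / 2).toNat := by omega
      rw [he]; exact hp1
  have : n / 2 * (if n % 2 = 0 then k ^ ((n + 1) / 2).toNat % pvP * (k % pvP) % pvP
        else k ^ ((n + 1) / 2).toNat % pvP) +
      (n - 1) / 2 * (k ^ ((n + 1) / 2).toNat % pvP)
      ≡ n / 2 * k ^ ((n + 2) / 2).toNat + (n - 1) / 2 * k ^ ((n + 1) / 2).toNat [ZMOD pvP] :=
    Int.ModEq.add (Int.ModEq.mul_left _ hp2) (Int.ModEq.mul_left _ hp1)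
  exact this

-- ===== VERDICT (by name: the statement is the Claim_ definition above) =====

theorem func_spec : Claim_equal_func := by
  intro n k _
  unfold Spec_func
  have hp : (0 : Int) < 10 ^ 9 + 7 := by norm_num
  have h2 : (0 : Int) < 2 := by norm_num
  by_cases hn : n < 2
  · have hB : func_alt n k = 0 := by unfold func_alt; rw [if_pos hn]
    have hA : func n k = 0 := by
      unfold func; rw [PySem.List.pyRange_one_eq_nil (by omega : n ≤ 1)]; rfl
    rw [hA, hB]
  · rw [pv_alt_value n k hn]
    simp only [func, PySem.Int.powMod,
      PySem.Int.mod_eq_emod_of_pos hp, PySem.Int.floordiv_eq_ediv_of_pos h2]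
    rw [pv_foldl_mod_sum' (10 ^ 9 + 7)
      (fun i => (k ^ ((i + 1) / 2).toNat % (10 ^ 9 + 7)) *
        (k ^ ((n - i + 1) / 2).toNat % (10 ^ 9 + 7) % (10 ^ 9 + 7)))]
    have hsum : ((PySem.List.pyRange 1 n 1).map
        (fun i => (k ^ ((i + 1) / 2).toNat % (10 ^ 9 + 7)) *
          (k ^ ((n - i + 1) / 2).toNat % (10 ^ 9 + 7) % (10 ^ 9 + 7)))).sum
        ≡ ((PySem.List.pyRange 1 n 1).map
        (fun i => k ^ (if i % 2 = 1 then ((n + 2) / 2).toNat else ((n + 1) / 2).toNat))).sum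
        [ZMOD (10 ^ 9 + 7)] := by
      refine pv_sum_map_modeq _ _ _ _ (fun i hi => ?_)
      rw [PySem.List.mem_pyRange_one] at hi
      exact pv_term_modeq _ n k i hi.1 hi.2
    have hclosed : ((PySem.List.pyRange 1 n 1).map
        (fun i => k ^ (if i % 2 = 1 then ((n + 2) / 2).toNat else ((n + 1) / 2).toNat))).sum
        = n / 2 * k ^ ((n + 2) / 2).toNat + (n - 1) / 2 * k ^ ((n + 1) / 2).toNat := by
      have hN : ((n.toNat : Int)) = n := by omega
      have h1N : 1 ≤ n.toNat := by omega
      have hps := pv_sum_parity (k ^ ((n + 2) / 2).toNat) (k ^ ((n + 1) / 2).toNat) n.toNat h1N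
      rw [hN] at hps
      rw [← hps]
      simp only [apply_ite (fun e : Nat => k ^ e)]
    rw [hclosed] at hsum
    exact hsum
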